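-- pv_equiv track=rewrite | github.com/arthurpcidrao/Python | fundamentals/Truth table logic math.py | double_negation
-- ===== SOURCE A (Python) =====
-- def double_negation(string):
--     resultado = []
--     i = 0
--     while i < len(string):
--         if string[i] == "~":
--             # Verifica se o próximo caractere também é "~"
--             if i + 1 < len(string) and string[i + 1] == "~":
--                 # Avança dois caracteres para remover ambos
--                 i += 2
--             else:
--                 # Adiciona apenas um "~" ao resultado
--                 resultado.append(string[i])
--                 i += 1
--         else:
--             # Adiciona o caractere atual ao resultado
--             resultado.append(string[i])
--             i += 1
--     # Converte a lista de caracteres de volta para uma string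
--     return "".join(resultado)
-- ===== SOURCE B (Python) =====
-- def double_negation(string):
--     out = []
--     run = 0
--     for ch in string:
--         if ch == "~":
--             run += 1
--         else:
--             out.append("~" * (run % 2))
--             out.append(ch)
--             run = 0
--     out.append("~" * (run % 2))
--     return "".join(out)
-- ===== Notes on version B (the rewrite author's own statement) =====
-- stated objective: alternative
-- what changed: Replaces A's index-based while loop with two-character lookahead by a single run-length pass that counts consecutive tildes and emits count%2 tildes at each run boundary.
import Mathlib
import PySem

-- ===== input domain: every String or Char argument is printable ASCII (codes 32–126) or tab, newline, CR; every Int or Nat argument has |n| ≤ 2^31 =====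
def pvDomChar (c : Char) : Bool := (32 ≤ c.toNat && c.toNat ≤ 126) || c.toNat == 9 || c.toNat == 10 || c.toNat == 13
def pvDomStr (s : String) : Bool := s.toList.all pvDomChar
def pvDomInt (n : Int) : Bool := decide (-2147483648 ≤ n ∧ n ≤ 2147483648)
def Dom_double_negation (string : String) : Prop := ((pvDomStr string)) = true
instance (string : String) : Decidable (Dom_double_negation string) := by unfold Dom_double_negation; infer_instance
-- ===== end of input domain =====

-- B replaces A's pair-lookahead index scan by a run-length parity pass (alternative decomposition, same cost).

-- ===== PORT A =====
-- A's while loop over index i: at '~' it looks one character ahead and either skips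
-- both (i += 2) or emits the single '~'; ported as structural recursion over the
-- remaining characters with the same lookahead and the same emitted values.
def dnA_loop : List Char → List Char
  | [] => []
  | c :: rest =>
    if c = '~' then
      -- lookahead at string[i + 1]
      match rest with
      | '~' :: rest2 => dnA_loop rest2
      | [] => [c]
      | d :: rest2 => c :: dnA_loop (d :: rest2)
    else c :: dnA_loop rest

def double_negation (string : String) : String :=
  String.ofList (dnA_loop string.toList)

-- ===== PORT B =====
-- B's single pass with a running count of consecutive '~'; at each non-'~' (and at
-- the end) it emits run % 2 tildes, then the character.
def dnB_loop : List Char → Nat → List Char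
  | [], run => List.replicate (run % 2) '~'
  | c :: rest, run =>
    if c = '~' then dnB_loop rest (run + 1)
    else List.replicate (run % 2) '~' ++ c :: dnB_loop rest 0

def double_negation_alt (string : String) : String :=
  String.ofList (dnB_loop string.toList 0)

-- ===== PRECONDITION & SPEC =====
def Spec_double_negation (string : String) (out : String) : Prop := out = double_negation_alt string
instance (string : String) (out : String) : Decidable (Spec_double_negation string out) := by unfold Spec_double_negation; infer_instance

-- ===== CLAIM (what is proved, stated in full; the proofs are below) =====
def Claim_equal_double_negation : Prop := ∀ (string : String), Dom_double_negation string → Spec_double_negation string (double_negation string)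

-- ===== LEMMAS AND PROOFS =====

-- A's greedy pair removal on a pure tilde run leaves run % 2 tildes.
lemma dnA_run_nil : ∀ run : Nat, dnA_loop (List.replicate run '~') = List.replicate (run % 2) '~' := by
  intro run
  induction run using Nat.strong_induction_on with
  | _ run ih =>
    match run with
    | 0 => simp [dnA_loop]
    | 1 => simp [dnA_loop, List.replicate]
    | (n + 2) =>
      have h : List.replicate (n + 2) '~' = '~' :: '~' :: List.replicate n '~' := by
        simp [List.replicate_succ]
      rw [h]
      have h2 : (n + 2) % 2 = n % 2 := Nat.add_mod_right n 2
      rw [h2, ← ih n (by omega)]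
      simp [dnA_loop]

-- dnA_loop on a non-tilde head just copies it.
lemma dnA_cons_ne (c : Char) (rest : List Char) (hc : c ≠ '~') :
    dnA_loop (c :: rest) = c :: dnA_loop rest := by
  rw [dnA_loop.eq_def]
  simp [hc]

-- dnA_loop on a tilde not followed by a tilde emits the tilde.
lemma dnA_tilde_cons (c : Char) (t : List Char) (hc : c ≠ '~') :
    dnA_loop ('~' :: c :: t) = '~' :: dnA_loop (c :: t) := by
  rw [dnA_loop.eq_def]
  split
  · simp_all
  · rename_i heq
    obtain ⟨rfl, rfl⟩ := heq
    rw [if_pos rfl]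
    split <;> simp_all

-- A's greedy pair removal on a tilde run followed by a non-tilde character.
lemma dnA_run_cons : ∀ (run : Nat) (c : Char) (rest : List Char), c ≠ '~' →
    dnA_loop (List.replicate run '~' ++ c :: rest)
      = List.replicate (run % 2) '~' ++ c :: dnA_loop rest := by
  intro run
  induction run using Nat.strong_induction_on with
  | _ run ih =>
    intro c rest hc
    match run with
    | 0 => simpa using dnA_cons_ne c rest hc
    | 1 =>
      simp only [List.replicate_succ, List.replicate_zero, List.nil_append, List.cons_append]
      rw [dnA_tilde_cons c rest hc, dnA_cons_ne c rest hc]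
    | (n + 2) =>
      have h : List.replicate (n + 2) '~' ++ c :: rest
          = '~' :: '~' :: (List.replicate n '~' ++ c :: rest) := by
        simp [List.replicate_succ]
      rw [h]
      have h2 : (n + 2) % 2 = n % 2 := Nat.add_mod_right n 2
      rw [h2, ← ih n (by omega) c rest hc]
      simp [dnA_loop]

-- Main invariant: A run over (run tildes ++ l) equals B's loop carrying the count.
lemma dnA_eq_dnB : ∀ (l : List Char) (run : Nat),
    dnA_loop (List.replicate run '~' ++ l) = dnB_loop l run := by
  intro l
  induction l with
  | nil => intro run; simpa [dnB_loop] using dnA_run_nil run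
  | cons c rest ih =>
    intro run
    by_cases hc : c = '~'
    · subst hc
      have h : List.replicate run '~' ++ '~' :: rest
          = List.replicate (run + 1) '~' ++ rest := by
        simp [List.replicate_succ']
      rw [h, ih (run + 1)]
      simp [dnB_loop]
    · rw [dnA_run_cons run c rest hc]
      simp only [dnB_loop, if_neg hc]
      rw [← ih 0]
      simp

-- ===== VERDICT (by name: the statement is the Claim_ definition above) =====
theorem double_negation_spec : Claim_equal_double_negation := by
  intro s _
  unfold Spec_double_negation double_negation double_negation_alt
  rw [← dnA_eq_dnB s.toList 0]
  simp
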